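-- pv_equiv track=rewrite | github.com/wannessels/sigrok-logicanalyzer-mcp | tests/test_sigrok_native.py | _generate_uart_byte
-- ===== SOURCE A (Python) =====
-- def _generate_uart_byte(byte_val, samplerate, baudrate, ch_bit=0):
--     """Generate UART signal samples for a single byte."""
--     spb = int(samplerate / baudrate)
--     samples = []
--     samples.extend([0] * spb)  # start bit (low)
--     for bit_num in range(8):
--         bit = (byte_val >> bit_num) & 1
--         samples.extend([bit << ch_bit] * spb)
--     samples.extend([(1 << ch_bit)] * spb)  # stop bit (high)
--     return samples
-- ===== SOURCE B (Python) =====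
-- def _generate_uart_byte(byte_val, samplerate, baudrate, ch_bit=0):
--     """Generate UART signal samples for a single byte."""
--     spb = int(samplerate / baudrate)
--     # 10-bit UART frame as one integer: bit 0 = start (0), bits 1..8 = data (LSB first), bit 9 = stop (1)
--     frame = ((byte_val & 0xFF) << 1) + 0x200
--     return [((frame >> (k // spb)) & 1) << ch_bit for k in range(10 * spb)]
-- ===== Notes on version B (the rewrite author's own statement) =====
-- stated objective: alternative
-- what changed: B packs the whole 10-bit UART frame (start bit, 8 data bits LSB-first, stop bit) into one integer ((byte_val & 0xFF) << 1) + 0x200 and computes each output sample directly from its index k as bit k // spb of that frame, in a single pass with no per-bit loop or list extensions.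
import Mathlib
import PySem

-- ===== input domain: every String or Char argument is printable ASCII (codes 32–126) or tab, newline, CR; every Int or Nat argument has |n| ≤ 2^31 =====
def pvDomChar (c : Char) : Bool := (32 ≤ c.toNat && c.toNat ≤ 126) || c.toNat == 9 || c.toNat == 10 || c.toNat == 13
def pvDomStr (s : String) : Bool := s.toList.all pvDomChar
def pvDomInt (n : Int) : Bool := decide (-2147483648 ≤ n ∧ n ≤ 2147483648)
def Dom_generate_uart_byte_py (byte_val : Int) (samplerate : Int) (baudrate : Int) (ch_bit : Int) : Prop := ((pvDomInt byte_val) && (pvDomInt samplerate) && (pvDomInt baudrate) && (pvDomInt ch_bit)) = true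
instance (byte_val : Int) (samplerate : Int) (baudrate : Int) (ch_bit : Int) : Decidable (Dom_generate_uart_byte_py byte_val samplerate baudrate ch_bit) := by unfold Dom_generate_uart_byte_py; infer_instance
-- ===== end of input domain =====

-- B encodes the 10-bit UART frame (start, 8 data bits LSB-first, stop) as a single
-- integer and computes every output sample directly from its index in one pass,
-- instead of A's per-bit loop of list extensions; objective: alternative.


-- ===== PORT A =====
-- int(samplerate / baudrate) truncates the float quotient toward zero: PySem.Int.truncdiv
-- (exact for |n| ≤ 2^31 < 2^53). [x] * spb is empty for spb ≤ 0: List.replicate spb.toNat.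
-- Python >>, <<, & are Int's >>> / <<< (shift amount .toNat; Pre_ gives 0 ≤ ch_bit,
-- bit_num is a Nat already) and PySem.Int.band.
def generate_uart_byte_py (byte_val : Int) (samplerate : Int) (baudrate : Int) (ch_bit : Int) : List Int :=
  let spb := PySem.Int.truncdiv samplerate baudrate
  let samples : List Int := []
  let samples := samples ++ List.replicate spb.toNat 0
  let samples := (List.range 8).foldl (fun (acc : List Int) (bit_num : Nat) =>
    let bit := PySem.Int.band (byte_val >>> bit_num) 1
    acc ++ List.replicate spb.toNat (bit <<< ch_bit.toNat)) samples
  samples ++ List.replicate spb.toNat ((1 : Int) <<< ch_bit.toNat)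

-- ===== PORT B =====
-- range(10 * spb) is pyRange (empty for spb ≤ 0); k // spb is PySem.Int.floordiv
-- (only evaluated with spb > 0, k ≥ 0, so the shift amount is its .toNat).
def generate_uart_byte_py_alt (byte_val : Int) (samplerate : Int) (baudrate : Int) (ch_bit : Int) : List Int :=
  let spb := PySem.Int.truncdiv samplerate baudrate
  let frame := (PySem.Int.band byte_val 255) <<< (1:Nat) + 512
  (PySem.List.pyRange 0 (10 * spb) 1).map (fun k =>
    (PySem.Int.band (frame >>> (PySem.Int.floordiv k spb).toNat) 1) <<< ch_bit.toNat)

-- ===== PRECONDITION & SPEC =====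
-- Python raises ZeroDivisionError when baudrate = 0 and ValueError on a negative
-- shift count when ch_bit < 0; exactly those inputs are excluded.
def Pre_generate_uart_byte_py (byte_val : Int) (samplerate : Int) (baudrate : Int) (ch_bit : Int) : Prop :=
  baudrate ≠ 0 ∧ 0 ≤ ch_bit
instance (byte_val : Int) (samplerate : Int) (baudrate : Int) (ch_bit : Int) : Decidable (Pre_generate_uart_byte_py byte_val samplerate baudrate ch_bit) := by unfold Pre_generate_uart_byte_py; infer_instance
def pvWitness_generate_uart_byte_py : Int × Int × Int × Int := (65, 8, 2, 1)

def Spec_generate_uart_byte_py (byte_val : Int) (samplerate : Int) (baudrate : Int) (ch_bit : Int) (out : List Int) : Prop := out = generate_uart_byte_py_alt byte_val samplerate baudrate ch_bit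
instance (byte_val : Int) (samplerate : Int) (baudrate : Int) (ch_bit : Int) (out : List Int) : Decidable (Spec_generate_uart_byte_py byte_val samplerate baudrate ch_bit out) := by unfold Spec_generate_uart_byte_py; infer_instance

-- ===== CLAIM (what is proved, stated in full; the proofs are below) =====
def Claim_equal_generate_uart_byte_py : Prop := ∀ (byte_val : Int) (samplerate : Int) (baudrate : Int) (ch_bit : Int), Dom_generate_uart_byte_py byte_val samplerate baudrate ch_bit → Pre_generate_uart_byte_py byte_val samplerate baudrate ch_bit → Spec_generate_uart_byte_py byte_val samplerate baudrate ch_bit (generate_uart_byte_py byte_val samplerate baudrate ch_bit)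

-- ===== LEMMAS AND PROOFS =====

-- Masking with 0xFF is reduction mod 256 (both signs; Python semantics).
theorem band_255_eq_mod (a : Int) : PySem.Int.band a 255 = PySem.Int.mod a 256 := by
  rw [PySem.Int.mod_eq_emod_of_pos (by norm_num)]
  unfold PySem.Int.band
  by_cases h : 0 ≤ a
  · rw [if_pos h, if_pos (by norm_num)]
    have h2 : a.toNat &&& Int.toNat 255 = a.toNat % 256 := by
      simpa using Nat.and_two_pow_sub_one_eq_mod a.toNat 8
    rw [h2]; omega
  · rw [if_neg h, if_pos (by norm_num)]
    have h2 : Int.toNat 255 &&& (-a - 1).toNat = (-a - 1).toNat % 256 := by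
      rw [Nat.and_comm]
      simpa using Nat.and_two_pow_sub_one_eq_mod (-a - 1).toNat 8
    rw [h2]; omega

-- Bit j+1 of the frame integer is data bit j of the byte (j < 8).
theorem frame_bit_data (b : Int) (j : Nat) (hj : j < 8) :
    PySem.Int.band (((PySem.Int.band b 255) <<< (1:Nat) + 512) >>> (j + 1)) 1 =
    PySem.Int.band (b >>> j) 1 := by
  simp only [band_255_eq_mod, PySem.Int.band_one,
    PySem.Int.mod_eq_emod_of_pos (show (0:Int) < 2 by norm_num),
    PySem.Int.mod_eq_emod_of_pos (show (0:Int) < 256 by norm_num),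
    Int.shiftRight_eq_div_pow, Int.shiftLeft_eq]
  interval_cases j <;> (first | (norm_num; omega) | norm_num)

-- Bit 0 of the frame (start bit) is 0.
theorem frame_bit_start (b : Int) :
    PySem.Int.band (((PySem.Int.band b 255) <<< (1:Nat) + 512) >>> (0:Nat)) 1 = 0 := by
  simp only [band_255_eq_mod, PySem.Int.band_one,
    PySem.Int.mod_eq_emod_of_pos (show (0:Int) < 2 by norm_num),
    PySem.Int.mod_eq_emod_of_pos (show (0:Int) < 256 by norm_num),
    Int.shiftRight_eq_div_pow, Int.shiftLeft_eq]
  norm_num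

-- Bit 9 of the frame (stop bit) is 1.
theorem frame_bit_stop (b : Int) :
    PySem.Int.band (((PySem.Int.band b 255) <<< (1:Nat) + 512) >>> (9:Nat)) 1 = 1 := by
  simp only [band_255_eq_mod, PySem.Int.band_one,
    PySem.Int.mod_eq_emod_of_pos (show (0:Int) < 2 by norm_num),
    PySem.Int.mod_eq_emod_of_pos (show (0:Int) < 256 by norm_num),
    Int.shiftRight_eq_div_pow, Int.shiftLeft_eq]
  norm_num; omega

-- B's index map over range(m*n) is m blocks of n equal samples.
theorem map_floordiv_blocks (h : Nat → Int) (n : Nat) (hn : 0 < n) : ∀ m : Nat,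
    (List.range (m * n)).map (fun (k : Nat) => h (PySem.Int.floordiv (k : Int) (n : Int)).toNat) =
    (List.range m).flatMap (fun j => List.replicate n (h j)) := by
  intro m
  induction m with
  | zero => simp
  | succ m ih =>
    rw [Nat.succ_mul, List.range_add, List.map_append, ih, List.range_succ,
      List.flatMap_append, List.flatMap_singleton, List.map_map]
    congr 1
    rw [List.eq_replicate_iff]
    refine ⟨by simp, ?_⟩
    intro x hx
    simp only [List.mem_map, List.mem_range, Function.comp] at hx
    obtain ⟨i, hi, rfl⟩ := hx
    have : PySem.Int.floordiv ((m * n + i : Nat) : Int) ((n : Nat) : Int) = ((m * n + i) / n : Nat) :=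
      PySem.Int.floordiv_natCast _ _
    rw [this]
    congr 1
    have : (m * n + i) / n = m := by
      rw [Nat.mul_comm m n, Nat.mul_add_div hn, Nat.div_eq_of_lt hi]; omega
    simp [this]

-- ===== VERDICT (by name: the statement is the Claim_ definition above) =====
theorem generate_uart_byte_py_spec : Claim_equal_generate_uart_byte_py := by
  intro byte_val samplerate baudrate ch_bit _ _
  unfold Spec_generate_uart_byte_py generate_uart_byte_py generate_uart_byte_py_alt
  dsimp only
  set spb := PySem.Int.truncdiv samplerate baudrate with hspb
  by_cases hpos : 0 < spb
  · -- spb > 0: both sides are 10 blocks of n samples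
    obtain ⟨n, hn⟩ : ∃ n : Nat, spb = (n : Int) := ⟨spb.toNat, by omega⟩
    have hn' : 0 < n := by omega
    rw [hn]
    simp only [Int.toNat_natCast]
    rw [show (10 : Int) * (n : Int) = ((10 * n : Nat) : Int) by push_cast; ring]
    rw [PySem.List.pyRange_zero_natCast, List.map_map, Function.comp_def]
    have hB : List.map (fun x : Nat =>
        PySem.Int.band ((PySem.Int.band byte_val 255 <<< (1:Nat) + 512) >>>
          (PySem.Int.floordiv (x : Int) (n : Int)).toNat) 1 <<< ch_bit.toNat) (List.range (10 * n)) =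
        (List.range 10).flatMap (fun (j : Nat) => List.replicate n
          ((PySem.Int.band ((PySem.Int.band byte_val 255 <<< (1:Nat) + 512) >>> j) 1) <<< ch_bit.toNat)) :=
      map_floordiv_blocks (fun (j : Nat) =>
        (PySem.Int.band ((PySem.Int.band byte_val 255 <<< (1:Nat) + 512) >>> j) 1) <<< ch_bit.toNat) n hn' 10
    rw [hB]
    have f0 := frame_bit_start byte_val
    have f9 := frame_bit_stop byte_val
    have g1 : PySem.Int.band ((PySem.Int.band byte_val 255 <<< (1:Nat) + 512) >>> (1:Nat)) 1 = PySem.Int.band (byte_val >>> (0:Nat)) 1 := frame_bit_data byte_val 0 (by omega)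
    have g2 : PySem.Int.band ((PySem.Int.band byte_val 255 <<< (1:Nat) + 512) >>> (2:Nat)) 1 = PySem.Int.band (byte_val >>> (1:Nat)) 1 := frame_bit_data byte_val 1 (by omega)
    have g3 : PySem.Int.band ((PySem.Int.band byte_val 255 <<< (1:Nat) + 512) >>> (3:Nat)) 1 = PySem.Int.band (byte_val >>> (2:Nat)) 1 := frame_bit_data byte_val 2 (by omega)
    have g4 : PySem.Int.band ((PySem.Int.band byte_val 255 <<< (1:Nat) + 512) >>> (4:Nat)) 1 = PySem.Int.band (byte_val >>> (3:Nat)) 1 := frame_bit_data byte_val 3 (by omega)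
    have g5 : PySem.Int.band ((PySem.Int.band byte_val 255 <<< (1:Nat) + 512) >>> (5:Nat)) 1 = PySem.Int.band (byte_val >>> (4:Nat)) 1 := frame_bit_data byte_val 4 (by omega)
    have g6 : PySem.Int.band ((PySem.Int.band byte_val 255 <<< (1:Nat) + 512) >>> (6:Nat)) 1 = PySem.Int.band (byte_val >>> (5:Nat)) 1 := frame_bit_data byte_val 5 (by omega)
    have g7 : PySem.Int.band ((PySem.Int.band byte_val 255 <<< (1:Nat) + 512) >>> (7:Nat)) 1 = PySem.Int.band (byte_val >>> (6:Nat)) 1 := frame_bit_data byte_val 6 (by omega)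
    have g8 : PySem.Int.band ((PySem.Int.band byte_val 255 <<< (1:Nat) + 512) >>> (8:Nat)) 1 = PySem.Int.band (byte_val >>> (7:Nat)) 1 := frame_bit_data byte_val 7 (by omega)
    simp only [List.range_succ, List.range_zero, List.nil_append, List.foldl_append, List.foldl_cons,
      List.foldl_nil, List.flatMap_append, List.flatMap_cons, List.flatMap_nil,
      List.append_nil, List.append_assoc, f0, f9, g1, g2, g3, g4, g5, g6, g7, g8,
      Int.zero_shiftLeft]
  · -- spb <= 0: both sides empty
    have h1 : spb.toNat = 0 := by omega
    have h2 : PySem.List.pyRange 0 (10 * spb) 1 = [] := by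
      apply PySem.List.pyRange_one_eq_nil; omega
    simp [h1, h2]
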